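-- pv_equiv track=rewrite | github.com/hyeon0208/CodingTest | 프로그래머스/unrated/142085. 디펜스 게임/디펜스 게임.py | solution
-- ===== SOURCE A (Python) =====
-- import heapq as hq
--
-- def solution(n, k, enemy):
--
--     if k == len(enemy):
--         return k
--
--     answer = 0
--     sumE = 0
--
--     heap = []
--
--     for e in enemy:
--         hq.heappush(heap, -e)
--         sumE += e
--         if sumE > n:
--             if k == 0:
--                 break
--             sumE += hq.heappop(heap)
--             k -= 1
--         answer += 1
--
--     return answer
-- ===== SOURCE B (Python) =====
-- import heapq as hq
--
-- def solution(n, k, enemy):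
--     count = 0
--     spent = 0
--     powered = []  # min-heap of the enemies currently holding a powerup
--     for e in enemy:
--         hq.heappush(powered, e)
--         if len(powered) > k:
--             spent += hq.heappop(powered)
--             if spent > n:
--                 return count
--         count += 1
--     return count
-- ===== Notes on version B (the rewrite author's own statement) =====
-- stated objective: idiomatic
-- what changed: Instead of A's max-heap of all enemies seen so far with health repaid on demand, B keeps a min-heap of only the (at most k) enemies currently assigned a powerup and a running total of evicted minima paid with health, checking the budget at eviction time; A's k == len(enemy) guard disappears.
-- outside the precondition, e.g. on solution(1, 1, [2, -1, 5]): A returns 2, B returns 3; on solution(6, -1, [12, 7, -1, 9]): A returns 4, B returns 0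
import Mathlib
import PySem

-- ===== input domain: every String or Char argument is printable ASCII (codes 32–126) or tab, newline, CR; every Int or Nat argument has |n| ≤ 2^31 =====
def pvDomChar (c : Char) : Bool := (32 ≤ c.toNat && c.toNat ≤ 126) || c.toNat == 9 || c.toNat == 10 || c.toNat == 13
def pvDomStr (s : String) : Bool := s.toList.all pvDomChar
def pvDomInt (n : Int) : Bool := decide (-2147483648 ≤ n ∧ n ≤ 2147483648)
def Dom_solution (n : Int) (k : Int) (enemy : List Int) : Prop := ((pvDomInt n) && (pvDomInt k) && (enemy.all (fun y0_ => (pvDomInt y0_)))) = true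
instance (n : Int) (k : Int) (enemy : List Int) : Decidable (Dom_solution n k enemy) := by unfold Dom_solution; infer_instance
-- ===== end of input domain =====

-- Instead of A's max-heap of every enemy seen (health repaid on demand), B keeps a min-heap of only
-- the at-most-k enemies currently holding a powerup, paying the evicted minima with health
-- (objective: idiomatic; same result on the stated domain).

-- ===== PORT A =====
-- hq.heappush on a heapq heap: the heap is modelled by its multiset of elements (push = append).
-- Exact for values: A only ever observes popped values, and heappop returns the minimum element.
def heapPushA (heap : List Int) (x : Int) : List Int := heap ++ [x]

-- hq.heappop: returns the minimum element and the heap with one occurrence of it removed.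
-- (A pops only right after a push, so the heap is never empty; the none branch is unreachable.)
def heapPopA (heap : List Int) : Int × List Int :=
  match heap.min? with
  | none => (0, [])
  | some m => (m, heap.erase m)

-- the `for e in enemy` loop of A; state (answer, sumE, k, heap); returning answer = Python's break
def loopA (n : Int) : List Int → Int → Int → Int → List Int → Int
  | [], answer, _, _, _ => answer
  | e :: rest, answer, sumE, k, heap =>
    let heap' := heapPushA heap (-e)
    let sumE' := sumE + e
    if sumE' > n then
      if k = 0 then answer
      else
        let p := heapPopA heap'
        loopA n rest (answer + 1) (sumE' + p.1) (k - 1) p.2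
    else
      loopA n rest (answer + 1) sumE' k heap'

def solution (n : Int) (k : Int) (enemy : List Int) : Int :=
  if k = (enemy.length : Int) then k
  else loopA n enemy 0 0 k []

-- ===== PORT B =====
-- B's `for e in enemy` loop; state (count, spent, powered); the min-heap `powered` is modelled by its
-- multiset of elements exactly as in port A (push = append, heappop = minimum + one removal);
-- `return count` inside the loop is the early exit. The `none` branch is unreachable (push precedes pop).
def loopB (n : Int) (k : Int) : List Int → Int → Int → List Int → Int
  | [], count, _, _ => count
  | e :: rest, count, spent, powered =>
    let powered' := powered ++ [e]
    if k < (powered'.length : Int) then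
      match powered'.min? with
      | none => count
      | some m =>
        let spent' := spent + m
        if n < spent' then count
        else loopB n k rest (count + 1) spent' (powered'.erase m)
    else loopB n k rest (count + 1) spent powered'

def solution_alt (n : Int) (k : Int) (enemy : List Int) : Int :=
  loopB n k enemy 0 0 []

-- ===== PRECONDITION & SPEC =====
-- Pre_ keeps the defense game's natural domain (no rounds, or a nonnegative powerup count and —
-- unless k = 0 or k covers every round — nonnegative per-round damages, as the original problem
-- statement guarantees); outside it A's path-dependent greedy pop timing and B's keep-the-k-largest
-- invariant can diverge.
def Pre_solution (n : Int) (k : Int) (enemy : List Int) : Prop :=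
  enemy = [] ∨ (0 ≤ k ∧ ((∀ e ∈ enemy, 0 ≤ e) ∨ k = 0 ∨ (enemy.length : Int) ≤ k))
instance (n : Int) (k : Int) (enemy : List Int) : Decidable (Pre_solution n k enemy) := by
  unfold Pre_solution; infer_instance

def pvWitness_solution : Int × Int × List Int := (10, 1, [4, 2, 4, 8, 3])

def Spec_solution (n : Int) (k : Int) (enemy : List Int) (out : Int) : Prop := out = solution_alt n k enemy
instance (n : Int) (k : Int) (enemy : List Int) (out : Int) : Decidable (Spec_solution n k enemy out) := by unfold Spec_solution; infer_instance

-- ===== CLAIM (what is proved, stated in full; the proofs are below) =====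
def Claim_equal_solution : Prop := ∀ (n : Int) (k : Int) (enemy : List Int), Dom_solution n k enemy → Pre_solution n k enemy → Spec_solution n k enemy (solution n k enemy)

-- ===== LEMMAS AND PROOFS =====

-- abbreviations used by the proofs
def sortl (l : List Int) : List Int := PySem.List.sorted l (fun x => x) false
def botSum (j : Nat) (l : List Int) : Int := ((sortl l).take j).sum

theorem sortl_sum (l : List Int) : (sortl l).sum = l.sum :=
  (PySem.List.sorted_perm l _ _).sum_eq

theorem sortl_length (l : List Int) : (sortl l).length = l.length :=
  PySem.List.length_sorted l _ _

theorem mem_sortl {x : Int} {l : List Int} : x ∈ sortl l ↔ x ∈ l :=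
  PySem.List.mem_sorted l _ _ x

-- splitting a sorted list along a low/high partition of its multiset
theorem sortl_split (S Pp l : List Int) (hperm : (S ++ Pp).Perm l)
    (hle : ∀ s ∈ S, ∀ p ∈ Pp, s ≤ p) : sortl l = sortl S ++ sortl Pp := by
  have hperm2 : (sortl S ++ sortl Pp).Perm l :=
    ((PySem.List.sorted_perm S _ _).append (PySem.List.sorted_perm Pp _ _)).trans hperm
  have hpw : (sortl S ++ sortl Pp).Pairwise (· ≤ ·) := by
    rw [List.pairwise_append]
    refine ⟨PySem.List.sorted_pairwise S (fun x => x), PySem.List.sorted_pairwise Pp (fun x => x), ?_⟩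
    intro a ha b hb
    exact hle a ((PySem.List.mem_sorted S _ _ a).mp ha) b ((PySem.List.mem_sorted Pp _ _ b).mp hb)
  exact PySem.List.sorted_id_eq_of_perm_of_pairwise l _ hperm2 hpw

theorem botSum_split (S Pp l : List Int) (hperm : (S ++ Pp).Perm l)
    (hle : ∀ s ∈ S, ∀ p ∈ Pp, s ≤ p) : botSum S.length l = S.sum := by
  unfold botSum
  rw [sortl_split S Pp l hperm hle,
    show S.length = (sortl S).length from (PySem.List.length_sorted S _ _).symm,
    List.take_left]
  exact (PySem.List.sorted_perm S _ _).sum_eq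

-- prefix sums of a nonnegative list are monotone in the prefix length
theorem sum_take_le (l : List Int) (hnn : ∀ x ∈ l, 0 ≤ x) {t t' : Nat} (h : t ≤ t') :
    (l.take t).sum ≤ (l.take t').sum := by
  have hnn2 : 0 ≤ ((l.drop t).take (t' - t)).sum :=
    List.sum_nonneg (fun x hx => hnn x (List.mem_of_mem_drop (List.mem_of_mem_take hx)))
  calc (l.take t).sum ≤ (l.take t).sum + ((l.drop t).take (t' - t)).sum := by omega
    _ = (l.take (t + (t' - t))).sum := by rw [List.take_add, List.sum_append]
    _ = (l.take t').sum := by congr 2; omega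

theorem botSum_mono (l : List Int) (hnn : ∀ x ∈ l, 0 ≤ x) {t t' : Nat} (h : t ≤ t') :
    botSum t l ≤ botSum t' l := by
  exact sum_take_le (sortl l) (fun x hx => hnn x ((PySem.List.mem_sorted l _ _ x).mp hx)) h

-- sorted of an appended element is an ordered insertion into the sorted list
theorem sortl_append_singleton (l : List Int) (e : Int) :
    sortl (l ++ [e]) = PySem.List.insertBy (fun a b => decide (a < b)) e (sortl l) := by
  unfold sortl
  rw [PySem.List.sorted_eq_foldl_insertBy, PySem.List.sorted_eq_foldl_insertBy, List.foldl_append]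
  rfl

-- the (q+1)-prefix sum after an insertion: either the inserted element joined the prefix, or not
theorem insertBy_take_succ_sum (e : Int) (s : List Int) (q : Nat) :
    ((PySem.List.insertBy (fun a b => decide (a < b)) e s).take (q + 1)).sum = (s.take q).sum + e ∨
    (q < s.length ∧
      ((PySem.List.insertBy (fun a b => decide (a < b)) e s).take (q + 1)).sum = (s.take (q + 1)).sum) := by
  induction s generalizing q with
  | nil =>
    left
    simp [PySem.List.insertBy]
  | cons b bs ih =>
    by_cases hb : e < b
    · left
      simp only [PySem.List.insertBy, hb, decide_true, if_true, List.take_succ_cons, List.sum_cons]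
      omega
    · simp only [PySem.List.insertBy, hb, decide_false, Bool.false_eq_true, if_false]
      cases q with
      | zero =>
        right
        exact ⟨by simp, by simp⟩
      | succ q' =>
        rcases ih q' with h | ⟨hlen, h⟩
        · left
          simp only [List.take_succ_cons, List.sum_cons]
          omega
        · right
          refine ⟨by simp; omega, ?_⟩
          simp only [List.take_succ_cons, List.sum_cons, h]

theorem insertBy_take_succ_sum_ge (e : Int) (s : List Int) (q : Nat)
    (he : 0 ≤ e) (hs : ∀ x ∈ s, 0 ≤ x) :
    (s.take q).sum ≤ ((PySem.List.insertBy (fun a b => decide (a < b)) e s).take (q + 1)).sum := by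
  rcases insertBy_take_succ_sum e s q with h | ⟨_, h⟩
  · rw [h]; omega
  · rw [h]; exact sum_take_le s hs (Nat.le_succ q)

-- the common characterization: after m rounds the game is still alive iff m needs no eviction yet
-- (m ≤ k) or the m - k cheapest enemies of the prefix fit within the health budget
def Qpred (n kk : Int) (enemy : List Int) (m : Nat) : Prop :=
  m ≤ kk.toNat ∨ botSum (m - kk.toNat) (enemy.take m) ≤ n

theorem Q_mono (n kk : Int) (enemy : List Int) (hnn : ∀ e ∈ enemy, 0 ≤ e)
    (m : Nat) (hml : m < enemy.length) (h : Qpred n kk enemy (m + 1)) : Qpred n kk enemy m := by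
  unfold Qpred at h ⊢
  rcases h with h | h
  · left
    omega
  · by_cases hcase : m < kk.toNat
    · left
      omega
    · right
      have h1 : m + 1 - kk.toNat = (m - kk.toNat) + 1 := by omega
      have htake : enemy.take (m + 1) = enemy.take m ++ [enemy[m]] := by
        rw [List.take_add_one]
        simp [List.getElem?_eq_getElem hml]
      rw [h1, htake] at h
      simp only [botSum] at h ⊢
      rw [sortl_append_singleton] at h
      refine le_trans (insertBy_take_succ_sum_ge enemy[m] (sortl (enemy.take m)) (m - kk.toNat)
        (hnn _ (List.getElem_mem hml)) ?_) h
      intro x hx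
      exact hnn x (List.mem_of_mem_take (mem_sortl.mp hx))

theorem Q_down (n kk : Int) (enemy : List Int) (hnn : ∀ e ∈ enemy, 0 ≤ e) :
    ∀ (a b : Nat), a ≤ b → b ≤ enemy.length → Qpred n kk enemy b → Qpred n kk enemy a := by
  have key : ∀ (d a : Nat), a + d ≤ enemy.length → Qpred n kk enemy (a + d) → Qpred n kk enemy a := by
    intro d
    induction d with
    | zero => intro a _ h; simpa using h
    | succ d' ih =>
      intro a hle h
      refine ih a (by omega) (Q_mono n kk enemy hnn (a + d') (by omega) ?_)
      rw [show a + d' + 1 = a + (d' + 1) by omega]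
      exact h
  intro a b hab hbl hb
  have := key (b - a) a (by omega) (by rw [show a + (b - a) = b by omega]; exact hb)
  exact this

theorem char_unique (n kk : Int) (enemy : List Int) (hnn : ∀ e ∈ enemy, 0 ≤ e) (a b : Nat)
    (haL : a ≤ enemy.length) (hbL : b ≤ enemy.length)
    (hQa : Qpred n kk enemy a) (hna : (a : Int) < (enemy.length : Int) → ¬ Qpred n kk enemy (a + 1))
    (hQb : Qpred n kk enemy b) (hnb : (b : Int) < (enemy.length : Int) → ¬ Qpred n kk enemy (b + 1)) :
    a = b := by
  by_contra hne
  rcases Nat.lt_or_ge a b with h | h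
  · exact (hna (by exact_mod_cast show a < enemy.length by omega))
      (Q_down n kk enemy hnn (a + 1) b (by omega) hbL hQb)
  · have hba : b < a := by omega
    exact (hnb (by exact_mod_cast show b < enemy.length by omega))
      (Q_down n kk enemy hnn (b + 1) a (by omega) haL hQa)

-- with k = 0 both loops pay every enemy immediately and stop at the first overrun, in lockstep
theorem loop_k0_eq (n : Int) : ∀ (rest : List Int) (c s : Int) (heap : List Int),
    loopA n rest c s 0 heap = loopB n 0 rest c s [] := by
  intro rest
  induction rest with
  | nil => intro c s heap; rfl
  | cons e tl ih =>
    intro c s heap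
    simp only [loopA, loopB, heapPushA, List.nil_append, List.length_cons, List.length_nil]
    rw [if_pos (by norm_num : (0 : Int) < ((0 + 1 : Nat) : Int))]
    simp only [List.min?_cons, List.min?_nil, Option.elim, List.erase_cons_head]
    by_cases h : n < s + e
    · rw [if_pos (show s + e > n from h)]
      simp [h]
    · rw [if_neg (show ¬ s + e > n from h), if_neg h]
      exact ih (c + 1) (s + e) _

-- with more powerups than remaining rounds, A never breaks
theorem loopA_bigK (n : Int) : ∀ (rest : List Int) (c s krem : Int) (heap : List Int),
    (rest.length : Int) < krem → loopA n rest c s krem heap = c + rest.length := by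
  intro rest
  induction rest with
  | nil => intro c s krem heap _; simp [loopA]
  | cons e tl ih =>
    intro c s krem heap hk
    simp only [List.length_cons] at hk
    simp only [loopA]
    split
    · rw [if_neg (by push_cast at hk; omega)]
      rw [ih _ _ _ _ (by push_cast at hk ⊢; omega)]
      simp only [List.length_cons]
      push_cast
      omega
    · rw [ih _ _ _ _ (by push_cast at hk ⊢; omega)]
      simp only [List.length_cons]
      push_cast
      omega

-- with more powerups than rounds, B never evicts
theorem loopB_bigK (n kk : Int) : ∀ (rest powered : List Int) (c s : Int),
    ((powered.length : Int) + rest.length ≤ kk) → loopB n kk rest c s powered = c + rest.length := by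
  intro rest
  induction rest with
  | nil => intro powered c s _; simp [loopB]
  | cons e tl ih =>
    intro powered c s hb
    simp only [List.length_cons] at hb
    simp only [loopB]
    rw [if_neg (by simp; push_cast at hb ⊢; omega)]
    rw [ih _ _ _ (by simp; push_cast at hb ⊢; omega)]
    simp only [List.length_cons]
    push_cast
    omega

theorem loopA_char (n kk : Int) (enemy : List Int) (hk : 0 ≤ kk)
    (hnn : ∀ e ∈ enemy, 0 ≤ e) :
    ∀ (rest pre S Pp heap : List Int) (krem : Int),
      enemy = pre ++ rest →
      heap.Perm (S.map (fun x => -x)) →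
      (S ++ Pp).Perm pre →
      (∀ s ∈ S, ∀ p ∈ Pp, s ≤ p) →
      (S = [] ∨ S.sum ≤ n) →
      (∀ p ∈ Pp, n < S.sum + p) →
      krem = kk - Pp.length →
      0 ≤ krem →
      ∃ r : Nat, loopA n rest (pre.length : Int) S.sum krem heap = (r : Int) ∧
        pre.length ≤ r ∧ r ≤ enemy.length ∧
        Qpred n kk enemy r ∧
        ((r : Int) < (enemy.length : Int) → ¬ Qpred n kk enemy (r + 1)) := by
  intro rest
  induction rest with
  | nil =>
    intro pre S Pp heap krem henemy hheap hpre hSP hsum hPp hkrem hkrem0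
    have hpe : pre = enemy := by simpa using henemy.symm
    subst hpe
    have hlens : S.length + Pp.length = pre.length := by
      have := hpre.length_eq
      simpa using this
    refine ⟨pre.length, rfl, le_refl _, le_refl _, ?_, by intro h; exact absurd h (by omega)⟩
    rcases hsum with hS0 | hs
    · unfold Qpred
      left
      have hS0' : S.length = 0 := by rw [hS0]; rfl
      omega
    · unfold Qpred
      right
      rw [List.take_length]
      have hle1 : pre.length - kk.toNat ≤ S.length := by omega
      calc botSum (pre.length - kk.toNat) pre ≤ botSum S.length pre := botSum_mono pre hnn hle1
        _ = S.sum := botSum_split S Pp pre hpre hSP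
        _ ≤ n := hs
  | cons e tl ih =>
    intro pre S Pp heap krem henemy hheap hpre hSP hsum hPp hkrem hkrem0
    have he : 0 ≤ e := hnn e (by rw [henemy]; exact List.mem_append_right _ (List.mem_cons_self))
    have hnnpre : ∀ x ∈ pre, 0 ≤ x := fun x hx => hnn x (by rw [henemy]; exact List.mem_append_left _ hx)
    have hlens : S.length + Pp.length = pre.length := by
      have := hpre.length_eq
      simpa using this
    simp only [loopA, heapPushA]
    have hheap2 : (heap ++ [-e]).Perm ((S ++ [e]).map (fun x => -x)) := by
      rw [List.map_append]
      exact hheap.append_right _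
    by_cases hgt : n < S.sum + e
    · rw [if_pos hgt]
      by_cases hk0 : krem = 0
      · rw [if_pos hk0]
        have hKP : kk.toNat = Pp.length := by omega
        have htk : enemy.take pre.length = pre := by rw [henemy, List.take_append]; simp
        refine ⟨pre.length, rfl, le_refl _, by rw [henemy]; simp, ?_, ?_⟩
        · rcases hsum with hS0 | hs
          · unfold Qpred
            left
            have hS0' : S.length = 0 := by rw [hS0]; rfl
            omega
          · unfold Qpred
            right
            rw [htk, show pre.length - kk.toNat = S.length by omega,
              botSum_split S Pp pre hpre hSP]
            exact hs
        · intro _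
          unfold Qpred
          rintro (h1 | hcon)
          · omega
          · have htk1 : enemy.take (pre.length + 1) = pre ++ [e] := by
              rw [henemy, List.take_append]
              simp
            have hidx : pre.length + 1 - kk.toNat = S.length + 1 := by omega
            rw [htk1, hidx] at hcon
            simp only [botSum, sortl_append_singleton, sortl_split S Pp pre hpre hSP] at hcon
            have hsS : (sortl S).length = S.length := sortl_length S
            rcases insertBy_take_succ_sum e (sortl S ++ sortl Pp) S.length with hcase | ⟨hlen, hcase⟩
            · rw [hcase, show S.length = (sortl S).length from hsS.symm, List.take_left,
                sortl_sum] at hcon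
              omega
            · rw [hcase] at hcon
              have hPne : Pp.length ≠ 0 := by
                simp only [List.length_append, hsS, sortl_length] at hlen
                omega
              obtain ⟨p0, sP', hsP⟩ : ∃ p0 sP', sortl Pp = p0 :: sP' := by
                cases hx : sortl Pp with
                | nil =>
                  exfalso
                  have := sortl_length Pp
                  rw [hx] at this
                  simp at this
                  omega
                | cons a b => exact ⟨a, b, rfl⟩
              rw [List.take_append, show S.length + 1 - (sortl S).length = 1 by omega,
                List.take_of_length_le (by omega), hsP] at hcon
              simp only [List.take_succ_cons, List.take_zero, List.sum_append, sortl_sum,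
                List.sum_cons, List.sum_nil] at hcon
              have hp0 : p0 ∈ Pp := by
                rw [← mem_sortl, hsP]
                exact List.mem_cons_self
              have := hPp p0 hp0
              omega
      · rw [if_neg hk0]
        have hne : -e ∈ heap ++ [-e] := List.mem_append_right _ (List.mem_cons_self)
        obtain ⟨M, hMmem, hMmax⟩ : ∃ M, M ∈ S ++ [e] ∧ ∀ x ∈ S ++ [e], x ≤ M := by
          cases hx : (S ++ [e]).max? with
          | none => simp [List.max?_eq_none_iff] at hx
          | some M => exact ⟨M, List.max?_eq_some_iff.mp hx⟩
        have hmin : (heap ++ [-e]).min? = some (-M) := by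
          rw [List.min?_eq_some_iff]
          constructor
          · rw [hheap2.mem_iff]
            exact List.mem_map_of_mem hMmem
          · intro y hy
            rcases List.mem_map.mp (hheap2.mem_iff.mp hy) with ⟨x, hx, rfl⟩
            have := hMmax x hx
            omega
        simp only [heapPopA, hmin]
        have hinj : Function.Injective (fun x : Int => -x) := fun a b hab => by simpa using hab
        have hS'perm : (S ++ [e]).Perm (M :: (S ++ [e]).erase M) := List.perm_cons_erase hMmem
        have hS'sum : ((S ++ [e]).erase M).sum = S.sum + e - M := by
          have := hS'perm.sum_eq
          simp only [List.sum_append, List.sum_cons, List.sum_nil] at this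
          omega
        have heM : e ≤ M := hMmax e (by simp)
        have hprex : enemy = (pre ++ [e]) ++ tl := by rw [henemy]; simp
        have hheap3 : ((heap ++ [-e]).erase (-M)).Perm (((S ++ [e]).erase M).map (fun x : Int => -x)) := by
          refine (hheap2.erase _).trans ?_
          rw [List.map_erase hinj]
        have hpre' : (((S ++ [e]).erase M) ++ (Pp ++ [M])).Perm (pre ++ [e]) := by
          have s2 : ((((S ++ [e]).erase M) ++ Pp) ++ [M]).Perm ((M :: ((S ++ [e]).erase M)) ++ Pp) := by
            simpa using List.perm_append_comm (l₁ := ((S ++ [e]).erase M) ++ Pp) (l₂ := [M])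
          have s3 : ((M :: ((S ++ [e]).erase M)) ++ Pp).Perm ((S ++ [e]) ++ Pp) :=
            hS'perm.symm.append_right Pp
          have s4 : ((S ++ [e]) ++ Pp).Perm ((S ++ Pp) ++ [e]) := by
            rw [List.append_assoc, List.append_assoc]
            exact List.Perm.append_left S List.perm_append_comm
          rw [show ((S ++ [e]).erase M) ++ (Pp ++ [M]) = (((S ++ [e]).erase M) ++ Pp) ++ [M]
            from (List.append_assoc _ _ _).symm]
          exact ((s2.trans s3).trans s4).trans (hpre.append_right _)
        have hSP' : ∀ s ∈ (S ++ [e]).erase M, ∀ p ∈ Pp ++ [M], s ≤ p := by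
          intro s hs p hp
          have hsSe : s ∈ S ++ [e] := List.erase_subset hs
          rcases List.mem_append.mp hp with hpPp | hpM
          · rcases List.mem_append.mp hsSe with hsS | hse
            · exact hSP s hsS p hpPp
            · have hse' : s = e := by simpa using hse
              by_contra hcon
              rw [hse'] at hcon
              have hMS : M ∉ S := by
                intro hMS
                have := hSP M hMS p hpPp
                omega
              have hMe : M = e := by
                rcases List.mem_append.mp hMmem with h | h
                · exact absurd h hMS
                · simpa using h
              have heS : e ∉ S := by
                intro heS
                have := hSP e heS p hpPp
                omega
              have hSS : (S ++ [e]).erase M = S := by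
                rw [hMe, List.erase_append_right _ heS]
                simp
              rw [hSS, hse'] at hs
              exact heS hs
          · have hpM' : p = M := by simpa using hpM
            subst hpM'
            exact hMmax s hsSe
        have hPp' : ∀ p ∈ Pp ++ [M], n < ((S ++ [e]).erase M).sum + p := by
          intro p hp
          rcases List.mem_append.mp hp with hpPp | hpM
          · by_cases hMe : M = e
            · rw [hS'sum, hMe]
              have := hPp p hpPp
              omega
            · have hMS : M ∈ S := by
                rcases List.mem_append.mp hMmem with h | h
                · exact h
                · exact absurd (by simpa using h) hMe
              have := hSP M hMS p hpPp
              rw [hS'sum]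
              omega
          · have hpM' : p = M := by simpa using hpM
            subst hpM'
            rw [hS'sum]
            omega
        have hsum' : ((S ++ [e]).erase M) = [] ∨ ((S ++ [e]).erase M).sum ≤ n := by
          rcases hsum with hS0 | hs
          · left
            have hMe : M = e := by
              rw [hS0] at hMmem
              simpa using hMmem
            rw [hS0, hMe]
            simp
          · right
            rw [hS'sum]
            omega
        have hkrem' : krem - 1 = kk - ((Pp ++ [M]).length : Int) := by
          simp only [List.length_append, List.length_cons, List.length_nil]
          push_cast
          omega
        obtain ⟨r, hr, hr1, hr2, hr3, hr4⟩ := ih (pre ++ [e]) ((S ++ [e]).erase M) (Pp ++ [M])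
          ((heap ++ [-e]).erase (-M)) (krem - 1) hprex hheap3 hpre' hSP' hsum'
          hPp' hkrem' (by omega)
        refine ⟨r, ?_, by simp at hr1; omega, hr2, hr3, hr4⟩
        have e1 : (((pre ++ [e]).length : Nat) : Int) = (pre.length : Int) + 1 := by
          simp
        have e2 : ((S ++ [e]).erase M).sum = S.sum + e + -M := by rw [hS'sum]; ring
        rw [e1, e2] at hr
        exact hr
    · rw [if_neg hgt]
      have hSP' : ∀ s ∈ S ++ [e], ∀ p ∈ Pp, s ≤ p := by
        intro s hs p hp
        rcases List.mem_append.mp hs with hsS | hse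
        · exact hSP s hsS p hp
        · have : s = e := by simpa using hse
          subst this
          have := hPp p hp
          omega
      obtain ⟨r, hr, hr1, hr2, hr3, hr4⟩ := ih (pre ++ [e]) (S ++ [e]) Pp (heap ++ [-e]) krem
        (by rw [henemy]; simp) hheap2
        (by
          have s4 : ((S ++ [e]) ++ Pp).Perm ((S ++ Pp) ++ [e]) := by
            rw [List.append_assoc, List.append_assoc]
            exact List.Perm.append_left S List.perm_append_comm
          exact s4.trans (hpre.append_right _))
        hSP' (Or.inr (by simp; omega)) (by intro p hp; have := hPp p hp; simp; omega)
        (by simpa using hkrem) hkrem0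
      refine ⟨r, ?_, by simp at hr1; omega, hr2, hr3, hr4⟩
      have e1 : (((pre ++ [e]).length : Nat) : Int) = (pre.length : Int) + 1 := by simp
      have e2 : (S ++ [e]).sum = S.sum + e := by simp
      rw [e1, e2] at hr
      exact hr

-- B's loop, characterized: from any state satisfying the top-k invariant it returns the largest
-- still-alive prefix length
theorem loopB_char (n kk : Int) (enemy : List Int) (hk : 0 ≤ kk)
    (hnn : ∀ e ∈ enemy, 0 ≤ e) :
    ∀ (rest pre E powered : List Int) (spent : Int),
      enemy = pre ++ rest →
      (E ++ powered).Perm pre →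
      (∀ x ∈ E, ∀ y ∈ powered, x ≤ y) →
      spent = E.sum →
      (E = [] ∨ spent ≤ n) →
      (powered.length : Int) ≤ kk →
      (E ≠ [] → (powered.length : Int) = kk) →
      ∃ r : Nat, loopB n kk rest (pre.length : Int) spent powered = (r : Int) ∧
        pre.length ≤ r ∧ r ≤ enemy.length ∧
        Qpred n kk enemy r ∧
        ((r : Int) < (enemy.length : Int) → ¬ Qpred n kk enemy (r + 1)) := by
  intro rest
  induction rest with
  | nil =>
    intro pre E powered spent henemy hperm horder hspent hd hsize hfull
    have hpe : pre = enemy := by simpa using henemy.symm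
    subst hpe
    have hlens : E.length + powered.length = pre.length := by
      have := hperm.length_eq
      simpa using this
    refine ⟨pre.length, rfl, le_refl _, le_refl _, ?_, by intro h; exact absurd h (by omega)⟩
    by_cases hE : E = []
    · unfold Qpred
      left
      have hE' : E.length = 0 := by rw [hE]; rfl
      omega
    · have hs : spent ≤ n := by
        rcases hd with h | h
        · exact absurd h hE
        · exact h
      have hkfull := hfull hE
      unfold Qpred
      right
      rw [List.take_length, show pre.length - kk.toNat = E.length by omega,
        botSum_split E powered pre hperm horder, ← hspent]
      exact hs
  | cons e tl ih =>
    intro pre E powered spent henemy hperm horder hspent hd hsize hfull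
    have he : 0 ≤ e := hnn e (by rw [henemy]; exact List.mem_append_right _ (List.mem_cons_self))
    have hlens : E.length + powered.length = pre.length := by
      have := hperm.length_eq
      simpa using this
    simp only [loopB]
    by_cases hover : kk < (((powered ++ [e]).length : Nat) : Int)
    · rw [if_pos hover]
      have hkfull : (powered.length : Int) = kk := by
        simp only [List.length_append, List.length_cons, List.length_nil] at hover
        push_cast at hover
        omega
      obtain ⟨m, hmem, hmin⟩ : ∃ m, m ∈ powered ++ [e] ∧ ∀ y ∈ powered ++ [e], m ≤ y := by
        cases hx : (powered ++ [e]).min? with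
        | none => simp [List.min?_eq_none_iff] at hx
        | some m => exact ⟨m, List.min?_eq_some_iff.mp hx⟩
      have hminx : (powered ++ [e]).min? = some m := by
        rw [List.min?_eq_some_iff]
        exact ⟨hmem, hmin⟩
      simp only [hminx]
      have hEperm : ((E ++ [m]) ++ ((powered ++ [e]).erase m)).Perm (pre ++ [e]) := by
        have s1 : (E ++ [m]) ++ ((powered ++ [e]).erase m)
            = E ++ (m :: (powered ++ [e]).erase m) := by
          rw [List.append_assoc]
          rfl
        have s2 : (E ++ (m :: (powered ++ [e]).erase m)).Perm (E ++ (powered ++ [e])) :=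
          List.Perm.append_left E (List.perm_cons_erase hmem).symm
        have s3 : E ++ (powered ++ [e]) = (E ++ powered) ++ [e] := by
          rw [List.append_assoc]
        rw [s1]
        exact (s2.trans (s3 ▸ List.Perm.refl _)).trans (hperm.append_right _)
      have horder' : ∀ x ∈ E ++ [m], ∀ y ∈ (powered ++ [e]).erase m, x ≤ y := by
        intro x hx y hy
        have hy' : y ∈ powered ++ [e] := List.erase_subset hy
        rcases List.mem_append.mp hx with hxE | hxm
        · by_cases hyp : y ∈ powered
          · exact horder x hxE y hyp
          · have hye : y = e := by
              rcases List.mem_append.mp hy' with h | h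
              · exact absurd h hyp
              · simpa using h
            rcases List.mem_append.mp hmem with hmp | hme
            · exact le_trans (horder x hxE m hmp) (by rw [hye]; exact hmin e (by simp))
            · exfalso
              have hme' : m = e := by simpa using hme
              have heP : e ∉ powered := by rw [← hye]; exact hyp
              have : (powered ++ [e]).erase m = powered := by
                rw [hme', List.erase_append_right _ heP]
                simp
              rw [this] at hy
              exact hyp (hye ▸ hy)
        · have hxm' : x = m := by simpa using hxm
          subst hxm'
          exact hmin y hy'
      have hsum' : (E ++ [m]).sum = spent + m := by
        rw [List.sum_append, hspent]
        simp
      have hlenE : ((powered ++ [e]).erase m).length = powered.length := by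
        rw [List.length_erase_of_mem hmem]
        simp
      by_cases hfail : n < spent + m
      · rw [if_pos hfail]
        refine ⟨pre.length, rfl, le_refl _, by rw [henemy]; simp, ?_, ?_⟩
        · by_cases hE : E = []
          · unfold Qpred
            left
            have hE' : E.length = 0 := by rw [hE]; rfl
            omega
          · have hs : spent ≤ n := by
              rcases hd with h | h
              · exact absurd h hE
              · exact h
            unfold Qpred
            right
            have htk : enemy.take pre.length = pre := by rw [henemy, List.take_append]; simp
            rw [htk, show pre.length - kk.toNat = E.length by omega,
              botSum_split E powered pre hperm horder, ← hspent]
            exact hs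
        · intro _
          unfold Qpred
          rintro (h1 | hcon)
          · omega
          · have htk1 : enemy.take (pre.length + 1) = pre ++ [e] := by
              rw [henemy, List.take_append]
              simp
            have hidx : pre.length + 1 - kk.toNat = E.length + 1 := by omega
            rw [htk1, hidx] at hcon
            have := botSum_split (E ++ [m]) ((powered ++ [e]).erase m) (pre ++ [e]) hEperm horder'
            simp only [List.length_append, List.length_cons, List.length_nil] at this
            rw [this, hsum'] at hcon
            omega
      · rw [if_neg hfail]
        obtain ⟨r, hr, hr1, hr2, hr3, hr4⟩ := ih (pre ++ [e]) (E ++ [m]) ((powered ++ [e]).erase m)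
          (spent + m) (by rw [henemy]; simp) hEperm horder' hsum'.symm (Or.inr (by omega))
          (by rw [hlenE]; omega) (fun _ => by rw [hlenE]; exact hkfull)
        refine ⟨r, ?_, by simp at hr1; omega, hr2, hr3, hr4⟩
        have e1 : (((pre ++ [e]).length : Nat) : Int) = (pre.length : Int) + 1 := by simp
        rw [e1] at hr
        exact hr
    · rw [if_neg hover]
      have hE : E = [] := by
        by_contra hE
        have := hfull hE
        apply hover
        simp only [List.length_append, List.length_cons, List.length_nil]
        push_cast
        omega
      have hspent0 : spent = 0 := by
        rw [hspent, hE]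
        rfl
      obtain ⟨r, hr, hr1, hr2, hr3, hr4⟩ := ih (pre ++ [e]) [] (powered ++ [e]) spent
        (by rw [henemy]; simp)
        (by
          have : (E ++ powered).Perm pre := hperm
          rw [hE] at this
          simp only [List.nil_append] at this ⊢
          exact this.append_right _)
        (by intro x hx; exact absurd hx (List.not_mem_nil))
        (by rw [hspent0]; rfl) (Or.inl rfl) (by push_cast at hover ⊢; omega)
        (fun hc => absurd rfl hc)
      refine ⟨r, ?_, by simp at hr1; omega, hr2, hr3, hr4⟩
      have e1 : (((pre ++ [e]).length : Nat) : Int) = (pre.length : Int) + 1 := by simp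
      rw [e1] at hr
      exact hr

-- ===== VERDICT (by name: the statement is the Claim_ definition above) =====
theorem solution_spec : Claim_equal_solution := by
  intro n k enemy _ hpre
  rcases hpre with hnil | ⟨hk, hdisj⟩
  · subst hnil
    unfold Spec_solution solution solution_alt
    split_ifs with hguard
    · simpa using hguard
    · rfl
  unfold Spec_solution solution solution_alt
  by_cases hbig : (enemy.length : Int) ≤ k
  · have hB : loopB n k enemy 0 0 [] = 0 + (enemy.length : Int) := by
      refine loopB_bigK n k enemy [] 0 0 ?_
      simpa using hbig
    split_ifs with hguard
    · rw [hB, ← hguard]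
      ring
    · rw [hB, loopA_bigK n enemy 0 0 k [] (by omega)]
  · have hguard : ¬ (k = (enemy.length : Int)) := by omega
    rw [if_neg hguard]
    by_cases hk0 : k = 0
    · subst hk0
      exact loop_k0_eq n enemy 0 0 []
    · have hnn : ∀ e ∈ enemy, 0 ≤ e := by
        rcases hdisj with h | h | h
        · exact h
        · exact absurd h hk0
        · exact absurd h hbig
      obtain ⟨ra, hra, _, hraL, hQa, hna⟩ := loopA_char n k enemy hk hnn enemy [] [] [] [] k
        rfl (List.Perm.refl _) (List.Perm.refl _) (by simp) (Or.inl rfl) (by simp) (by simp) hk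
      obtain ⟨rb, hrb, _, hrbL, hQb, hnb⟩ := loopB_char n k enemy hk hnn enemy [] [] [] 0
        rfl (List.Perm.refl _) (by simp) (by simp) (Or.inl rfl) (by simpa using hk)
        (fun hc => absurd rfl hc)
      simp only [List.length_nil, List.sum_nil, Nat.cast_zero] at hra hrb
      rw [hra, hrb]
      exact_mod_cast char_unique n k enemy hnn ra rb hraL hrbL hQa hna hQb hnb
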